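-- pv_equiv track=rewrite | github.com/jacobcy/genflow | core/tools/trending_tools/topic_trends.py | _count_words_in_topics
-- ===== SOURCE A (Python) =====
-- from typing import Dict, List, Optional, Set, Union, Tuple
--
-- def _count_words_in_topics(topics: List[Dict]) -> int:
--     """统计话题数据中的字数
--
--     Args:
--         topics: 话题列表
--
--     Returns:
--         int: 总字数
--     """
--     if not topics:
--         return 0
--
--     # 将所有话题数据转为字符串
--     text = ""
--     for topic in topics:
--         title = topic.get("title", "")
--         desc = topic.get("desc", "")
--         text += f"{title} {desc} "
--
--     # 使用空格分词统计（简易统计，实际应考虑中文）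
--     return len(text)
-- ===== SOURCE B (Python) =====
-- def _count_words_in_topics(topics):
--     """统计话题数据中的字数 (sum of lengths, no string building)."""
--     return sum(len(str(topic.get("title", ""))) + len(str(topic.get("desc", ""))) + 2
--                for topic in topics)
-- ===== Notes on version B (the rewrite author's own statement) =====
-- stated objective: simpler
-- what changed: B never builds the concatenated string: it sums len(title)+len(desc)+2 per topic directly (and drops the empty-list early return, since an empty sum is 0).
import Mathlib
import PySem

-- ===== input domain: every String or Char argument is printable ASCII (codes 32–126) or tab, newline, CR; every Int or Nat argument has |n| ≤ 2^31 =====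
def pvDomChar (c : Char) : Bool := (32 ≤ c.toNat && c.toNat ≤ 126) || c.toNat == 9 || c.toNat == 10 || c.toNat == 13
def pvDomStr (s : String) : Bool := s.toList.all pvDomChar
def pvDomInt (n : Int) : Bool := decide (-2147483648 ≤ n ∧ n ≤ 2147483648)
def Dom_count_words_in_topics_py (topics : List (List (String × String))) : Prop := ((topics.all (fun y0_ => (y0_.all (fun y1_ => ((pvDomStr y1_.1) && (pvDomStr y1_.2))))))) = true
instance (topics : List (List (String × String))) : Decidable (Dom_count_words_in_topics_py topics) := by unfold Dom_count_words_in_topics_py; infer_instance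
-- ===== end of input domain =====

-- B drops the string building: it sums len(title)+len(desc)+2 per topic instead of
-- concatenating every topic into one string and measuring it (objective: simpler).


-- ===== PORT A =====
-- topic.get(k, "")  (dict as association list, first match)
def pvGetStr (topic : List (String × String)) (k : String) : String :=
  (List.lookup k topic).getD ""

-- Literal port of A: early return 0 on empty, then build the concatenated text
-- (held as List Char, the PySem string representation) and return its length.
def count_words_in_topics_py (topics : List (List (String × String))) : Int :=
  if topics = [] then 0
  else
    let text : List Char :=
      topics.foldl
        (fun acc topic =>
          acc ++ (pvGetStr topic "title").toList ++ [' ']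
              ++ (pvGetStr topic "desc").toList ++ [' '])
        []
    PySem.Chars.len text

-- ===== PORT B =====
-- sum(len(title) + len(desc) + 2 for topic in topics)
def count_words_in_topics_py_alt (topics : List (List (String × String))) : Int :=
  (topics.map
    (fun topic =>
      PySem.Str.len (pvGetStr topic "title") + PySem.Str.len (pvGetStr topic "desc") + 2)).sum

-- ===== PRECONDITION & SPEC =====
def Spec_count_words_in_topics_py (topics : List (List (String × String))) (out : Int) : Prop := out = count_words_in_topics_py_alt topics
instance (topics : List (List (String × String))) (out : Int) : Decidable (Spec_count_words_in_topics_py topics out) := by unfold Spec_count_words_in_topics_py; infer_instance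

-- ===== CLAIM (what is proved, stated in full; the proofs are below) =====
def Claim_equal_count_words_in_topics_py : Prop := ∀ (topics : List (List (String × String))), Dom_count_words_in_topics_py topics → Spec_count_words_in_topics_py topics (count_words_in_topics_py topics)

-- ===== LEMMAS AND PROOFS =====

-- The length of the text A's loop accumulates = length of the start + B's sum.
theorem pv_loop_len (topics : List (List (String × String))) (acc : List Char) :
    ((topics.foldl
        (fun acc topic =>
          acc ++ (pvGetStr topic "title").toList ++ [' ']
              ++ (pvGetStr topic "desc").toList ++ [' '])
        acc).length : Int)
      = (acc.length : Int) + count_words_in_topics_py_alt topics := by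
  induction topics generalizing acc with
  | nil => simp [count_words_in_topics_py_alt]
  | cons t ts ih =>
      simp only [List.foldl_cons, List.map_cons, List.sum_cons, count_words_in_topics_py_alt] at *
      rw [ih]
      simp [PySem.Str.len]
      ring

-- ===== VERDICT (by name: the statement is the Claim_ definition above) =====
theorem count_words_in_topics_py_spec : Claim_equal_count_words_in_topics_py := by
  intro topics _
  unfold Spec_count_words_in_topics_py count_words_in_topics_py
  split_ifs with h
  · subst h; simp [count_words_in_topics_py_alt]
  · simpa [PySem.Chars.len] using pv_loop_len topics []
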